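-- pv_equiv track=rewrite | github.com/Spiffical/hydrophone-labeling-verification-app | app/utils/data_loading.py | _normalize_item_key
-- ===== SOURCE A (Python) =====
-- from typing import Dict, Optional, Tuple
--
-- def _normalize_item_key(key: Optional[str]) -> Optional[str]:
--     if not key:
--         return key
--     lower_key = key.lower()
--     for ext in (".mat", ".npy", ".png", ".jpg", ".jpeg", ".wav", ".flac", ".mp3"):
--         if lower_key.endswith(ext):
--             return key[: -len(ext)]
--     return key
-- ===== SOURCE B (Python) =====
-- from typing import Dict, Optional, Tuple
--
-- _KNOWN_EXTS = frozenset({".mat", ".npy", ".png", ".jpg", ".jpeg", ".wav", ".flac", ".mp3"})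
--
-- def _normalize_item_key(key: Optional[str]) -> Optional[str]:
--     if not key:
--         return key
--     lower_key = key.lower()
--     idx = lower_key.rfind('.')
--     if idx == -1:
--         return key
--     ext = lower_key[idx:]
--     if ext in _KNOWN_EXTS:
--         return key[:len(key) - len(ext)]
--     return key
-- ===== Notes on version B (the rewrite author's own statement) =====
-- stated objective: idiomatic
-- what changed: Instead of scanning the tuple of extensions with one endswith test per extension, B extracts the suffix from the last dot once (rfind) and does a single frozenset membership test; equivalent because every known extension is a single dotted token.
import Mathlib
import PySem

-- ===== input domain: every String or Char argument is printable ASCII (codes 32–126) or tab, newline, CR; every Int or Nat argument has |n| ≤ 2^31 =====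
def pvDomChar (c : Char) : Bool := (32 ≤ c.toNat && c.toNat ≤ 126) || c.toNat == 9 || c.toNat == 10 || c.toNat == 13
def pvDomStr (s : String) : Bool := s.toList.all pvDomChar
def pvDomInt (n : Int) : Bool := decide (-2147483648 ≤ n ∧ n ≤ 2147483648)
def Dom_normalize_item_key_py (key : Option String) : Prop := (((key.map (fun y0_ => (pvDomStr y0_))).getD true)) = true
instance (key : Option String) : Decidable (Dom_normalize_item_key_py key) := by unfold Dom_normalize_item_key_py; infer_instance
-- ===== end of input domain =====

-- B replaces A's per-extension endswith scan by one rfind-based suffix extraction plus a single set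
-- membership test (idiomatic, differently shaped pass; not claimed faster).

-- ===== PORT A =====
def pvAExts : List String := [".mat", ".npy", ".png", ".jpg", ".jpeg", ".wav", ".flac", ".mp3"]

-- the 'for ext in (…): if lower_key.endswith(ext): return key[:-len(ext)]' loop
def pvALoop (key lower : String) : List String → String
  | [] => key
  | e :: rest =>
      if PySem.Str.endswith lower e then PySem.Str.slice key none (some (-(PySem.Str.len e)))
      else pvALoop key lower rest

def normalize_item_key_py (key : Option String) : Option String :=
  match key with
  | none => none
  | some k =>
      if k = "" then some k
      else some (pvALoop k (PySem.Str.lower k) pvAExts)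

-- ===== PORT B =====
def pvBExtSet : PySem.Set String :=
  PySem.Set.ofList [".mat", ".npy", ".png", ".jpg", ".jpeg", ".wav", ".flac", ".mp3"]

def normalize_item_key_py_alt (key : Option String) : Option String :=
  match key with
  | none => none
  | some k =>
      if k = "" then some k
      else
        let lowerKey := PySem.Str.lower k
        let idx := PySem.Str.rfind lowerKey "."
        if idx = -1 then some k
        else
          let ext := PySem.Str.slice lowerKey (some idx) none
          if PySem.Set.contains pvBExtSet ext then
            some (PySem.Str.slice k none (some (PySem.Str.len k - PySem.Str.len ext)))
          else some k

-- ===== PRECONDITION & SPEC =====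
def Spec_normalize_item_key_py (key : Option String) (out : Option String) : Prop := out = normalize_item_key_py_alt key
instance (key : Option String) (out : Option String) : Decidable (Spec_normalize_item_key_py key out) := by unfold Spec_normalize_item_key_py; infer_instance

-- ===== CLAIM (what is proved, stated in full; the proofs are below) =====
def Claim_equal_normalize_item_key_py : Prop := ∀ (key : Option String), Dom_normalize_item_key_py key → Spec_normalize_item_key_py key (normalize_item_key_py key)

-- ===== LEMMAS AND PROOFS =====

-- equations of PySem.Chars.rfind.go
lemma pv_go_zero (L sub : List Char) :
    PySem.Chars.rfind.go L sub 0 = if sub.isPrefixOf L then 0 else -1 := rfl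

lemma pv_go_succ (L sub : List Char) (j : Nat) :
    PySem.Chars.rfind.go L sub (j + 1) =
      if sub.isPrefixOf (L.drop (j + 1)) then ((j : Int) + 1) else PySem.Chars.rfind.go L sub j := by
  simp [PySem.Chars.rfind.go]

-- rfind.go returns the largest match position below m
lemma pv_go_eq (L sub : List Char) (m j : Nat) (hj : j ≤ m)
    (hp : sub.isPrefixOf (L.drop j) = true)
    (hmax : ∀ i, j < i → i ≤ m → sub.isPrefixOf (L.drop i) = false) :
    PySem.Chars.rfind.go L sub m = (j : Int) := by
  induction m with
  | zero =>
      interval_cases j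
      simpa [pv_go_zero] using hp
  | succ m ih =>
      rw [pv_go_succ]
      by_cases h : sub.isPrefixOf (L.drop (m + 1)) = true
      · have : j = m + 1 := by
          by_contra hne
          have := hmax (m + 1) (by omega) (by omega)
          simp [h] at this
        simp [h, this]
      · have hj' : j ≤ m := by
          rcases Nat.lt_or_ge j (m + 1) with h' | h'
          · omega
          · have : j = m + 1 := by omega
            rw [this] at hp; simp [hp] at h
        simp only [h]
        exact ih hj' (fun i h1 h2 => hmax i h1 (by omega))

lemma pv_go_cases (L sub : List Char) (m : Nat) :
    PySem.Chars.rfind.go L sub m = -1 ∨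
      ∃ j : Nat, j ≤ m ∧ PySem.Chars.rfind.go L sub m = (j : Int) ∧ sub.isPrefixOf (L.drop j) = true := by
  induction m with
  | zero =>
      by_cases h : sub.isPrefixOf L = true
      · exact Or.inr ⟨0, le_refl 0, by simp [pv_go_zero, h], by simpa using h⟩
      · exact Or.inl (by simp [pv_go_zero, h])
  | succ m ih =>
      rw [pv_go_succ]
      by_cases h : sub.isPrefixOf (L.drop (m + 1)) = true
      · exact Or.inr ⟨m + 1, le_refl _, by simp [h], h⟩
      · simp only [h]
        rcases ih with h' | ⟨j, hj, he, hp⟩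
        · exact Or.inl h'
        · exact Or.inr ⟨j, by omega, he, hp⟩

-- the last '.' of a list ending in '.'::tail (tail dot-free) sits exactly at length - (tail.length+1)
lemma pv_rfind_dot (L tail : List Char) (hnd : '.' ∉ tail) (h : ('.' :: tail) <:+ L) :
    PySem.Chars.rfind L ['.'] = ((L.length - (tail.length + 1) : Nat) : Int) ∧
      L.drop (L.length - (tail.length + 1)) = '.' :: tail := by
  obtain ⟨pre, hpre⟩ := h
  have hlen : L.length = pre.length + (tail.length + 1) := by
    subst hpre; simp
  have hdrop : L.drop pre.length = '.' :: tail := by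
    subst hpre; simp
  have hj : L.length - (tail.length + 1) = pre.length := by omega
  refine ⟨?_, by rw [hj]; exact hdrop⟩
  rw [hj]
  show PySem.Chars.rfind.go L ['.'] L.length = (pre.length : Int)
  apply pv_go_eq
  · omega
  · rw [hdrop]; simp [List.isPrefixOf]
  · intro i h1 h2
    have hd2 : L.drop i = tail.drop (i - pre.length - 1) := by
      conv_lhs => rw [← hpre]
      obtain ⟨m, hm, rfl⟩ : ∃ m, 1 ≤ m ∧ i = pre.length + m := ⟨i - pre.length, by omega, by omega⟩
      rw [List.drop_append, List.drop_eq_nil_of_le (by omega), List.nil_append,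
        show pre.length + m - pre.length = (m - 1) + 1 by omega, List.drop_succ_cons]
      norm_num
    by_contra hc
    simp only [Bool.not_eq_false] at hc
    rw [List.isPrefixOf_iff_prefix] at hc
    have : '.' ∈ L.drop i := hc.subset (by simp)
    rw [hd2] at this
    exact hnd (List.mem_of_mem_drop this)

-- negative-stop slice equals the corresponding nonnegative-stop slice
lemma pv_slice_neg {α : Type} (xs : List α) (m : Nat) (h0 : 0 < m) (h : m ≤ xs.length) :
    PySem.List.slice xs none (some (-(m : Int))) =
      PySem.List.slice xs none (some ((xs.length : Int) - (m : Int))) := by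
  simp only [PySem.List.slice, PySem.List.clampIdx]
  split_ifs <;> (congr 1) <;> omega

lemma pv_toList_lower (k : String) : (PySem.Str.lower k).toList = PySem.Chars.lower k.toList := by
  simp [PySem.Str.lower]

lemma pv_lower_length (k : String) :
    (PySem.Chars.lower k.toList).length = k.toList.length := by
  simp [PySem.Chars.lower]

-- common positive case: lower(key) ends with the known extension es = '.'::tail
lemma pv_case (k : String) (hk : ¬ k = "") (es : String) (tail : List Char)
    (hes : es.toList = '.' :: tail) (hnd : '.' ∉ tail)
    (hmem : PySem.Set.contains pvBExtSet es = true)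
    (hsuf : ('.' :: tail) <:+ PySem.Chars.lower k.toList) :
    normalize_item_key_py_alt (some k) =
      some (PySem.Str.slice k none (some (-(PySem.Str.len es)))) := by
  have hL := pv_rfind_dot (PySem.Chars.lower k.toList) tail hnd hsuf
  set L := PySem.Chars.lower k.toList with hLdef
  set j : Nat := L.length - (tail.length + 1) with hjdef
  have hrf : PySem.Str.rfind (PySem.Str.lower k) "." = (j : Int) := by
    rw [PySem.Str.rfind_eq, pv_toList_lower]
    exact hL.1
  have hlen_le : tail.length + 1 ≤ L.length := by
    have := hsuf.length_le; simpa using this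
  have hext : PySem.Str.slice (PySem.Str.lower k) (some ((j : Nat) : Int)) none = es := by
    apply String.toList_inj.mp
    rw [PySem.Str.toList_slice, PySem.Chars.slice_eq_listSlice, pv_toList_lower,
      PySem.List.slice_from _ (by positivity)]
    rw [hes, Int.toNat_natCast]
    exact hL.2
  simp only [normalize_item_key_py_alt, if_neg hk]
  rw [hrf]
  have hne : ((j : Nat) : Int) ≠ -1 := by omega
  rw [if_neg hne, hext, if_pos hmem]
  congr 1
  apply String.toList_inj.mp
  simp only [PySem.Str.toList_slice, PySem.Chars.slice_eq_listSlice]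
  have hlen_es : es.toList.length = tail.length + 1 := by rw [hes]; simp
  have hklen : k.toList.length = L.length := (pv_lower_length k).symm
  rw [PySem.Str.len_eq, PySem.Str.len_eq, hlen_es,
    pv_slice_neg k.toList (tail.length + 1) (by omega) (by omega)]

lemma pv_hsuf (k es : String) (h : PySem.Str.endswith (PySem.Str.lower k) es = true) :
    es.toList <:+ PySem.Chars.lower k.toList := by
  rw [PySem.Str.endswith_eq, pv_toList_lower] at h
  exact (PySem.Chars.endswith_iff _ _).mp h

lemma pv_hnot (k es : String) (h : ¬ PySem.Str.endswith (PySem.Str.lower k) es = true) :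
    PySem.Chars.endswith (PySem.Chars.lower k.toList) es.toList = false := by
  rw [← pv_toList_lower, ← PySem.Str.endswith_eq]
  simpa using h

-- common negative case: no known extension is a suffix of lower(key)
lemma pv_unmatched (k : String) (hk : ¬ k = "")
    (h : ∀ es ∈ pvAExts, PySem.Chars.endswith (PySem.Chars.lower k.toList) es.toList = false) :
    normalize_item_key_py_alt (some k) = some k := by
  simp only [normalize_item_key_py_alt, if_neg hk]
  rcases pv_go_cases (PySem.Str.lower k).toList ".".toList (PySem.Str.lower k).toList.length with hc | ⟨j, hj, he, hp⟩
  · rw [show PySem.Str.rfind (PySem.Str.lower k) "." = -1 from hc]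
    simp
  · rw [show PySem.Str.rfind (PySem.Str.lower k) "." = (j : Int) from he]
    have hne : ((j : Nat) : Int) ≠ -1 := by omega
    rw [if_neg hne]
    set ext := PySem.Str.slice (PySem.Str.lower k) (some ((j : Nat) : Int)) none with hext
    have hextL : ext.toList = (PySem.Chars.lower k.toList).drop j := by
      rw [hext, PySem.Str.toList_slice, PySem.Chars.slice_eq_listSlice,
        PySem.List.slice_from _ (by positivity), Int.toNat_natCast, pv_toList_lower]
    by_cases hm : PySem.Set.contains pvBExtSet ext = true
    · exfalso
      have hmem : ext ∈ ([".mat", ".npy", ".png", ".jpg", ".jpeg", ".wav", ".flac", ".mp3"] : List String) := by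
        simpa [pvBExtSet, PySem.Set.contains, PySem.Set.ofList] using hm
      have hsuf : ext.toList <:+ PySem.Chars.lower k.toList := by
        rw [hextL]; exact List.drop_suffix _ _
      have := h ext (by simpa [pvAExts] using hmem)
      rw [(PySem.Chars.endswith_iff _ _).mpr hsuf] at this
      exact absurd this (by simp)
    · simp only [Bool.not_eq_true] at hm
      rw [hm]
      simp

-- ===== VERDICT (by name: the statement is the Claim_ definition above) =====
theorem normalize_item_key_py_spec : Claim_equal_normalize_item_key_py := by
  intro key _
  unfold Spec_normalize_item_key_py
  match key with
  | none => rfl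
  | some k =>
    by_cases hk : k = ""
    · simp [normalize_item_key_py, normalize_item_key_py_alt, hk]
    · simp only [normalize_item_key_py, if_neg hk]
      by_cases h1 : PySem.Str.endswith (PySem.Str.lower k) ".mat" = true
      · simp only [pvAExts, pvALoop]
        rw [if_pos h1]
        exact (pv_case k hk ".mat" ['m','a','t'] (by decide) (by decide) (by decide)
          (by have := pv_hsuf k ".mat" h1
              rwa [show (".mat" : String).toList = ['.','m','a','t'] from by decide] at this)).symm
      by_cases h2 : PySem.Str.endswith (PySem.Str.lower k) ".npy" = true
      · simp only [pvAExts, pvALoop]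
        rw [if_neg h1, if_pos h2]
        exact (pv_case k hk ".npy" ['n','p','y'] (by decide) (by decide) (by decide)
          (by have := pv_hsuf k ".npy" h2
              rwa [show (".npy" : String).toList = ['.','n','p','y'] from by decide] at this)).symm
      by_cases h3 : PySem.Str.endswith (PySem.Str.lower k) ".png" = true
      · simp only [pvAExts, pvALoop]
        rw [if_neg h1, if_neg h2, if_pos h3]
        exact (pv_case k hk ".png" ['p','n','g'] (by decide) (by decide) (by decide)
          (by have := pv_hsuf k ".png" h3
              rwa [show (".png" : String).toList = ['.','p','n','g'] from by decide] at this)).symm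
      by_cases h4 : PySem.Str.endswith (PySem.Str.lower k) ".jpg" = true
      · simp only [pvAExts, pvALoop]
        rw [if_neg h1, if_neg h2, if_neg h3, if_pos h4]
        exact (pv_case k hk ".jpg" ['j','p','g'] (by decide) (by decide) (by decide)
          (by have := pv_hsuf k ".jpg" h4
              rwa [show (".jpg" : String).toList = ['.','j','p','g'] from by decide] at this)).symm
      by_cases h5 : PySem.Str.endswith (PySem.Str.lower k) ".jpeg" = true
      · simp only [pvAExts, pvALoop]
        rw [if_neg h1, if_neg h2, if_neg h3, if_neg h4, if_pos h5]
        exact (pv_case k hk ".jpeg" ['j','p','e','g'] (by decide) (by decide) (by decide)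
          (by have := pv_hsuf k ".jpeg" h5
              rwa [show (".jpeg" : String).toList = ['.','j','p','e','g'] from by decide] at this)).symm
      by_cases h6 : PySem.Str.endswith (PySem.Str.lower k) ".wav" = true
      · simp only [pvAExts, pvALoop]
        rw [if_neg h1, if_neg h2, if_neg h3, if_neg h4, if_neg h5, if_pos h6]
        exact (pv_case k hk ".wav" ['w','a','v'] (by decide) (by decide) (by decide)
          (by have := pv_hsuf k ".wav" h6
              rwa [show (".wav" : String).toList = ['.','w','a','v'] from by decide] at this)).symm
      by_cases h7 : PySem.Str.endswith (PySem.Str.lower k) ".flac" = true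
      · simp only [pvAExts, pvALoop]
        rw [if_neg h1, if_neg h2, if_neg h3, if_neg h4, if_neg h5, if_neg h6, if_pos h7]
        exact (pv_case k hk ".flac" ['f','l','a','c'] (by decide) (by decide) (by decide)
          (by have := pv_hsuf k ".flac" h7
              rwa [show (".flac" : String).toList = ['.','f','l','a','c'] from by decide] at this)).symm
      by_cases h8 : PySem.Str.endswith (PySem.Str.lower k) ".mp3" = true
      · simp only [pvAExts, pvALoop]
        rw [if_neg h1, if_neg h2, if_neg h3, if_neg h4, if_neg h5, if_neg h6, if_neg h7, if_pos h8]
        exact (pv_case k hk ".mp3" ['m','p','3'] (by decide) (by decide) (by decide)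
          (by have := pv_hsuf k ".mp3" h8
              rwa [show (".mp3" : String).toList = ['.','m','p','3'] from by decide] at this)).symm
      simp only [pvAExts, pvALoop]
      rw [if_neg h1, if_neg h2, if_neg h3, if_neg h4, if_neg h5, if_neg h6, if_neg h7, if_neg h8]
      refine (pv_unmatched k hk ?_).symm
      intro es hes
      simp only [pvAExts, List.mem_cons, List.not_mem_nil, or_false] at hes
      rcases hes with rfl | rfl | rfl | rfl | rfl | rfl | rfl | rfl
      · exact pv_hnot _ _ h1
      · exact pv_hnot _ _ h2
      · exact pv_hnot _ _ h3
      · exact pv_hnot _ _ h4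
      · exact pv_hnot _ _ h5
      · exact pv_hnot _ _ h6
      · exact pv_hnot _ _ h7
      · exact pv_hnot _ _ h8
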